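-- pv_equiv track=rewrite | github.com/RRana6400/VisuaLearn | Sorting/quickSort.py | colourBar
-- ===== SOURCE A (Python) =====
-- def colourBar(data_length, head, tail, initial, curridx, isSwapping= False):
--   colorBar=[]
--
--   for i in range(data_length):
--
--     if i>= head and i<=tail:
--       colorBar.append("gray")
--     else:
--       colorBar.append("white")
--
--     if(i== tail):
--       colorBar[i]=='orange'
--     elif (i == initial) :
--       colorBar[i]=='red'
--     elif (i==curridx):
--       colorBar[i]=='yellow'
--
--     if(isSwapping):
--       if(i==initial or i == curridx):
--         colorBar[i]= 'green'
--   return colorBar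
-- ===== SOURCE B (Python) =====
-- def colourBar(data_length, head, tail, initial, curridx, isSwapping=False):
--     # Segment construction: compute the clamped boundaries of the gray block
--     # with arithmetic, build the bar from three replicated segments, then
--     # patch 'green' at the (bounds-checked) highlight indices when swapping.
--     n = max(data_length, 0)
--     lo = min(max(head, 0), n)
--     hi = min(max(tail + 1, lo), n)
--     bar = ["white"] * lo + ["gray"] * (hi - lo) + ["white"] * (n - hi)
--     if isSwapping:
--         for idx in (initial, curridx):
--             if 0 <= idx < n:
--                 bar[idx] = "green"
--     return bar
-- ===== Notes on version B (the rewrite author's own statement) =====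
-- stated objective: alternative
-- what changed: B replaces A's per-element loop (branching on each index) by arithmetic: it clamps the gray block's boundaries lo/hi once, concatenates three replicated segments white*lo + gray*(hi-lo) + white*(n-hi), and then patches 'green' at the two bounds-checked highlight indices when isSwapping (A's 'colorBar[i]==...' lines are no-op comparisons).
import Mathlib
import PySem

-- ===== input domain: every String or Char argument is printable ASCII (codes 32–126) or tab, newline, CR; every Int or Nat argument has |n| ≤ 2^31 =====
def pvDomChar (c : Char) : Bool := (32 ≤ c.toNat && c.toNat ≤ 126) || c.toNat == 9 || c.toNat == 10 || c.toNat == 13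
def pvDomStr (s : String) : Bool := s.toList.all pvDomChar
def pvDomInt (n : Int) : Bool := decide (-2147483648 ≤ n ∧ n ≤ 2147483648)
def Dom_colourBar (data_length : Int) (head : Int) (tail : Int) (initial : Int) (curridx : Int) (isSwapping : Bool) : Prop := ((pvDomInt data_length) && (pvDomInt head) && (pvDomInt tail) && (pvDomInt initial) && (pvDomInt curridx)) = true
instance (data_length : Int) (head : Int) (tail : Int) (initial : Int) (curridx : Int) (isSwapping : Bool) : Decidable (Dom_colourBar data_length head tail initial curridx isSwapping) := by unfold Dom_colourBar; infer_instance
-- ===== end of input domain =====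

-- B computes the gray block's clamped boundaries arithmetically and concatenates three
-- replicated segments, then patches 'green' at the bounds-checked highlight indices,
-- instead of A's per-element branching loop; same values, objective: alternative.

-- ===== PORT A =====
-- Literal port of A's loop: append gray/white, then (A's `colorBar[i]=='orange'` /
-- `=='red'` / `=='yellow'` lines are bare comparison EXPRESSIONS, not assignments:
-- no-ops, so they translate to nothing), then if isSwapping overwrite index i with green.
def colourBar (data_length : Int) (head : Int) (tail : Int) (initial : Int) (curridx : Int) (isSwapping : Bool) : List String :=
  (PySem.List.pyRange 0 data_length 1).foldl (fun colorBar i =>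
    let colorBar := colorBar ++ [if i ≥ head && i ≤ tail then "gray" else "white"]
    if isSwapping then
      (if i == initial || i == curridx then colorBar.set i.toNat "green" else colorBar)
    else colorBar) []

-- ===== PORT B =====
-- helper for B: write "green" at idx if it is in range (B's `if 0 <= idx < n`)
def pvSetGreen (bar : List String) (n : Int) (idx : Int) : List String :=
  if 0 ≤ idx ∧ idx < n then bar.set idx.toNat "green" else bar

def colourBar_alt (data_length : Int) (head : Int) (tail : Int) (initial : Int) (curridx : Int) (isSwapping : Bool) : List String :=
  let n := max data_length 0
  let lo := min (max head 0) n
  let hi := min (max (tail + 1) lo) n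
  let bar := List.replicate lo.toNat "white" ++ List.replicate (hi - lo).toNat "gray"
      ++ List.replicate (n - hi).toNat "white"
  if isSwapping then pvSetGreen (pvSetGreen bar n initial) n curridx else bar

-- ===== PRECONDITION & SPEC =====
def Spec_colourBar (data_length : Int) (head : Int) (tail : Int) (initial : Int) (curridx : Int) (isSwapping : Bool) (out : List String) : Prop := out = colourBar_alt data_length head tail initial curridx isSwapping
instance (data_length : Int) (head : Int) (tail : Int) (initial : Int) (curridx : Int) (isSwapping : Bool) (out : List String) : Decidable (Spec_colourBar data_length head tail initial curridx isSwapping out) := by unfold Spec_colourBar; infer_instance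

-- ===== CLAIM (what is proved, stated in full; the proofs are below) =====
def Claim_equal_colourBar : Prop := ∀ (data_length : Int) (head : Int) (tail : Int) (initial : Int) (curridx : Int) (isSwapping : Bool), Dom_colourBar data_length head tail initial curridx isSwapping → Spec_colourBar data_length head tail initial curridx isSwapping (colourBar data_length head tail initial curridx isSwapping)

-- ===== LEMMAS AND PROOFS =====

-- the value A's loop leaves at position i
def pvElem (head tail initial curridx : Int) (isSwapping : Bool) (i : Int) : String :=
  if isSwapping ∧ (i = initial ∨ i = curridx) then "green"
  else if head ≤ i ∧ i ≤ tail then "gray" else "white"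

-- A's loop produces exactly the per-index values pvElem
theorem colourBar_eq_map (head tail initial curridx : Int) (sw : Bool) (n : Nat) :
    colourBar (n : Int) head tail initial curridx sw
      = (PySem.List.pyRange 0 (n : Int) 1).map (pvElem head tail initial curridx sw) := by
  induction n with
  | zero => simp [colourBar, PySem.List.pyRange_one_eq_nil]
  | succ m ih =>
    unfold colourBar at ih ⊢
    have hcast : ((m + 1 : Nat) : Int) = (m : Int) + 1 := by push_cast; ring
    rw [hcast, PySem.List.pyRange_one_succ_right (by positivity), List.foldl_append,
        List.map_append, ih]
    simp only [List.foldl_cons, List.foldl_nil, List.map_cons, List.map_nil]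
    cases sw with
    | false =>
      rw [if_neg (by simp)]
      simp [pvElem, ge_iff_le, decide_eq_true_eq]
    | true =>
      rw [if_pos rfl]
      by_cases h : ((m : Int) = initial ∨ (m : Int) = curridx)
      · have hb : (((m : Int)) == initial || ((m : Int)) == curridx) = true := by
          rcases h with h | h <;> simp [h]
        rw [if_pos hb]
        rw [List.set_append_right _ _ (by simp)]
        simp [pvElem, h]
      · have hb : (((m : Int)) == initial || ((m : Int)) == curridx) = false := by
          rcases not_or.mp h with ⟨ha, hb⟩; simp [ha, hb]
        rw [if_neg (by simp [hb])]
        simp [pvElem, h, ge_iff_le, decide_eq_true_eq]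

theorem getElem?_pvSetGreen (bar : List String) (d idx : Int) (k : Nat) :
    (pvSetGreen bar d idx)[k]? =
      if 0 ≤ idx ∧ idx < d ∧ idx = (k : Int) ∧ k < bar.length then some "green"
      else bar[k]? := by
  unfold pvSetGreen
  by_cases h1 : 0 ≤ idx ∧ idx < d
  · rw [if_pos h1, List.getElem?_set]
    by_cases h2 : idx.toNat = k
    · rw [if_pos h2, h2]
      by_cases h3 : k < bar.length
      · rw [if_pos h3, if_pos ⟨h1.1, h1.2, by omega, h3⟩]
      · rw [if_neg h3, if_neg (by tauto)]
        exact (List.getElem?_eq_none (by omega)).symm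
    · rw [if_neg h2, if_neg (by rintro ⟨_, _, h4, _⟩; exact h2 (by omega))]
  · rw [if_neg h1, if_neg (by tauto)]

-- the three-segment base bar, read at position k, is gray/white by the clamped bounds
theorem getElem?_segments (lo hi n : Int) (h0 : 0 ≤ lo) (h1 : lo ≤ hi) (h2 : hi ≤ n) (k : Nat) :
    (List.replicate lo.toNat "white" ++ List.replicate (hi - lo).toNat "gray"
      ++ List.replicate (n - hi).toNat "white")[k]? =
      if (k : Int) < n then some (if lo ≤ (k : Int) ∧ (k : Int) < hi then "gray" else "white")
      else none := by
  have hlen1 : (List.replicate lo.toNat "white"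
      ++ List.replicate (hi - lo).toNat "gray").length = hi.toNat := by
    simp only [List.length_append, List.length_replicate]; omega
  by_cases hk : (k : Int) < n
  · rw [if_pos hk]
    by_cases hb : (k : Int) < hi
    · rw [List.getElem?_append_left (by omega)]
      by_cases ha : (k : Int) < lo
      · rw [List.getElem?_append_left (by simp only [List.length_replicate]; omega),
            List.getElem?_replicate, if_pos (by omega), if_neg (by omega)]
      · rw [List.getElem?_append_right (by simp only [List.length_replicate]; omega),
            List.getElem?_replicate, if_pos (by simp only [List.length_replicate]; omega),
            if_pos (by omega)]
    · rw [List.getElem?_append_right (by omega), List.getElem?_replicate,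
          if_pos (by rw [hlen1]; omega), if_neg (by omega)]
  · rw [if_neg hk]
    apply List.getElem?_eq_none
    simp only [List.length_append, List.length_replicate]; omega

-- B's bar (isSwapping case) equals the same per-index values as A's loop
theorem alt_eq_map (d head tail initial curridx : Int) (sw : Bool) :
    colourBar_alt d head tail initial curridx sw
      = (PySem.List.pyRange 0 d 1).map (pvElem head tail initial curridx sw) := by
  unfold colourBar_alt
  set n := max d 0 with hn
  set lo := min (max head 0) n with hlo
  set hi := min (max (tail + 1) lo) n with hhi
  have h0 : 0 ≤ lo := by omega
  have h1 : lo ≤ hi := by omega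
  have h2 : hi ≤ n := by omega
  have hbase : ∀ k : Nat,
      (List.replicate lo.toNat "white" ++ List.replicate (hi - lo).toNat "gray"
        ++ List.replicate (n - hi).toNat "white")[k]?
      = ((PySem.List.pyRange 0 d 1).map
          (fun i => if head ≤ i ∧ i ≤ tail then "gray" else "white"))[k]? := by
    intro k
    rw [getElem?_segments lo hi n h0 h1 h2, List.getElem?_map,
        PySem.List.getElem?_pyRange_one]
    by_cases hk : (k : Int) < n
    · have hkd : k < ((d : Int) - 0).toNat := by omega
      rw [if_pos hk, if_pos hkd]
      simp only [Option.map_some, Option.some.injEq]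
      by_cases hg : head ≤ (k : Int) ∧ (k : Int) ≤ tail
      · rw [if_pos (show lo ≤ (k : Int) ∧ (k : Int) < hi by omega), if_pos (by simpa using hg)]
      · rw [if_neg (show ¬ (lo ≤ (k : Int) ∧ (k : Int) < hi) by omega), if_neg (by simpa using hg)]
    · have hkd : ¬ k < ((d : Int) - 0).toNat := by omega
      rw [if_neg hk, if_neg hkd]; rfl
  have hbaseeq := List.ext_getElem? hbase
  have hlen : (List.replicate lo.toNat "white" ++ List.replicate (hi - lo).toNat "gray"
      ++ List.replicate (n - hi).toNat "white").length = n.toNat := by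
    simp; omega
  cases sw with
  | false =>
    rw [if_neg (by simp), hbaseeq]
    apply List.map_congr_left
    intro i _
    simp [pvElem]
  | true =>
    rw [if_pos rfl]
    apply List.ext_getElem?
    intro k
    rw [getElem?_pvSetGreen, getElem?_pvSetGreen]
    have hlen2 : (pvSetGreen (List.replicate lo.toNat "white"
        ++ List.replicate (hi - lo).toNat "gray"
        ++ List.replicate (n - hi).toNat "white") n initial).length = n.toNat := by
      unfold pvSetGreen; split_ifs <;> simp only [List.length_set, List.length_append, List.length_replicate] <;> omega
    rw [hlen2, hlen, hbase]
    rw [List.getElem?_map, List.getElem?_map, PySem.List.getElem?_pyRange_one]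
    by_cases hk : (k : Int) < n
    · have hkk : k < ((d : Int) - 0).toNat := by omega
      rw [if_pos hkk]
      simp only [Option.map_some]
      by_cases hc : curridx = (k : Int)
      · rw [if_pos ⟨by omega, by omega, hc, by omega⟩]
        simp [pvElem, hc.symm]
      · rw [if_neg (by tauto)]
        by_cases hi' : initial = (k : Int)
        · rw [if_pos ⟨by omega, by omega, hi', by omega⟩]
          simp [pvElem, hi'.symm]
        · rw [if_neg (by tauto)]
          simp only [Option.some.injEq]
          have ha : ¬ ((k : Int) = initial) := fun h => hi' h.symm
          have hb : ¬ ((k : Int) = curridx) := fun h => hc h.symm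
          simp [pvElem, ha, hb]
    · rw [if_neg (show ¬ (0 ≤ curridx ∧ curridx < n ∧ curridx = (k : Int) ∧ k < n.toNat) by omega),
          if_neg (show ¬ (0 ≤ initial ∧ initial < n ∧ initial = (k : Int) ∧ k < n.toNat) by omega),
          if_neg (show ¬ k < ((d : Int) - 0).toNat by omega)]
      rfl

-- ===== VERDICT (by name: the statement is the Claim_ definition above) =====
theorem colourBar_spec : Claim_equal_colourBar := by
  intro d head tail initial curridx sw _
  unfold Spec_colourBar
  rw [alt_eq_map]
  by_cases h : d ≤ 0
  · unfold colourBar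
    rw [PySem.List.pyRange_one_eq_nil h]; rfl
  · obtain ⟨n, rfl⟩ : ∃ n : Nat, d = (n : Int) := ⟨d.toNat, by omega⟩
    exact colourBar_eq_map head tail initial curridx sw n
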